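-- pv_equiv track=rewrite | github.com/NVlabs/RADIO | examples/common/hadamard.py | _is_paley_construction
-- ===== SOURCE A (Python) =====
-- def _is_paley_construction(q: int, modulo: int):
--     is_paley = False
--     if _is_prime(q):
--         for z in range(1, 11):
--             qz = q ** z
--             if qz % 4 == modulo:
--                 is_paley = True
--                 break
--     return is_paley
--
-- def _is_prime(n: int):
--     factors = _get_prime_factors(n)
--     return len(factors) == 1
--
-- def _get_prime_factors(n: int):
--     i = 2
--     factors = []
--     while i * i <= n:
--         if n % i != 0:
--             i += 1
--         else:
--             n //= i
--             factors.append(i)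
--     if n > 1:
--         factors.append(n)
--     return factors
-- ===== SOURCE B (Python) =====
-- def _is_paley_construction(q: int, modulo: int):
--     # primality by direct trial division: no divisor d with d*d <= q
--     if q < 2:
--         return False
--     d = 2
--     while d * d <= q:
--         if q % d == 0:
--             return False
--         d += 1
--     # q**z % 4 is eventually periodic, so the z-loop collapses to a
--     # closed-form case analysis on q's residue mod 4
--     if q == 2:
--         return modulo in (2, 0)
--     if q % 4 == 1:
--         return modulo == 1
--     return modulo in (3, 1)
-- ===== Notes on version B (the rewrite author's own statement) =====
-- stated objective: simpler
-- what changed: Primality is a direct trial-division test (early return on the first divisor) instead of computing the full prime factorisation and counting factors, and the z in 1..10 power loop is replaced by a closed-form case analysis on q % 4 (q**z % 4 is eventually periodic).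
import Mathlib
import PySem

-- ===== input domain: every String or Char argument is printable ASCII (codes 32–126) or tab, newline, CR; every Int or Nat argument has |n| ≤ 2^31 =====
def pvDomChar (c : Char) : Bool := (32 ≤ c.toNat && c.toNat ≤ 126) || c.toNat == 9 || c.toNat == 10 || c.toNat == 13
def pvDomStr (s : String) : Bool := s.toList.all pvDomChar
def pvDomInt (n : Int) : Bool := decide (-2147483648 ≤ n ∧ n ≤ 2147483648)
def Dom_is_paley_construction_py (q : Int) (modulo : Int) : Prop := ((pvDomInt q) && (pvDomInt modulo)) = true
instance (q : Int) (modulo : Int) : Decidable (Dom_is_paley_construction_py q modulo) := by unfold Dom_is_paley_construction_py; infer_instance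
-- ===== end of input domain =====

-- B replaces the factor-counting primality test by direct trial division and the z-loop by a
-- closed-form case analysis on q % 4 (objective: simpler); equal return value proved on all inputs.

-- ===== PORT A =====
-- arithmetic facts cited by pvFactorsGo's termination proof
theorem pvEdivFacts (n i : Int) (hi : 2 ≤ i) (hle : i * i ≤ n) : i ≤ n / i ∧ n / i < n := by
  have hq := Int.mul_ediv_add_emod n i
  have hr0 : 0 ≤ n % i := Int.emod_nonneg n (by omega)
  have hri : n % i < i := Int.emod_lt_of_pos n (by omega)
  constructor <;> nlinarith [hq, hr0, hri]

-- while-loop of _get_prime_factors; `2 ≤ i` is an invariant of the Python loop (i starts at 2 and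
-- only increments), carried as a proof argument solely to justify totality.
def pvFactorsGo (i n : Int) (acc : List Int) (hi : 2 ≤ i) : List Int :=
  if hle : i * i ≤ n then
    if PySem.Int.mod n i ≠ 0 then
      pvFactorsGo (i + 1) n acc (by omega)
    else
      pvFactorsGo i (PySem.Int.floordiv n i) (acc ++ [i]) hi
  else if 1 < n then acc ++ [n] else acc
termination_by (2 * n - i).toNat
decreasing_by
  · have h2i : 2 * i ≤ i * i := by nlinarith
    omega
  · have h2i : 2 * i ≤ i * i := by nlinarith
    have hfd : PySem.Int.floordiv n i = n / i := PySem.Int.floordiv_eq_ediv_of_pos (by omega)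
    have hlt := (pvEdivFacts n i hi hle).2
    omega

def pvGetPrimeFactors (n : Int) : List Int := pvFactorsGo 2 n [] (by omega)

def pvIsPrime (n : Int) : Bool := (pvGetPrimeFactors n).length == 1

-- the `for z in range(1, 11)` loop with its break; q ** z ported as q ^ z.toNat (exact here: every
-- z produced by range(1, 11) is positive)
def pvPaleyLoop (q modulo : Int) : List Int → Bool
  | [] => false
  | z :: rest =>
      if PySem.Int.mod (q ^ z.toNat) 4 == modulo then true else pvPaleyLoop q modulo rest

def is_paley_construction_py (q : Int) (modulo : Int) : Bool :=
  if pvIsPrime q then pvPaleyLoop q modulo (PySem.List.pyRange 1 11 1) else false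

-- ===== PORT B =====
-- trial-division while loop of Source B: true iff no divisor d with d*d <= q is found
def pvTrial (q d : Int) : Bool :=
  if h : d * d ≤ q then
    if PySem.Int.mod q d == 0 then false else pvTrial q (d + 1)
  else true
termination_by (q + 2 - d).toNat
decreasing_by
  by_cases hd : 1 ≤ d
  · have : d ≤ d * d := by nlinarith
    omega
  · have : 0 ≤ d * d := mul_self_nonneg d
    omega

def is_paley_construction_py_alt (q : Int) (modulo : Int) : Bool :=
  if q < 2 then false
  else if pvTrial q 2 = false then false
  else if q = 2 then (modulo == 2 || modulo == 0)
  else if PySem.Int.mod q 4 == 1 then modulo == 1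
  else (modulo == 3 || modulo == 1)

-- ===== PRECONDITION & SPEC =====
def Spec_is_paley_construction_py (q : Int) (modulo : Int) (out : Bool) : Prop := out = is_paley_construction_py_alt q modulo
instance (q : Int) (modulo : Int) (out : Bool) : Decidable (Spec_is_paley_construction_py q modulo out) := by unfold Spec_is_paley_construction_py; infer_instance

-- ===== CLAIM (what is proved, stated in full; the proofs are below) =====
def Claim_equal_is_paley_construction_py : Prop := ∀ (q : Int) (modulo : Int), Dom_is_paley_construction_py q modulo → Spec_is_paley_construction_py q modulo (is_paley_construction_py q modulo)

-- ===== LEMMAS AND PROOFS =====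

-- the factor list keeps growing: with n ≥ 2 at least one factor is appended
theorem pvFactorsGo_len_ge (i n : Int) (acc : List Int) (hi : 2 ≤ i) (hn : 2 ≤ n) :
    acc.length + 1 ≤ (pvFactorsGo i n acc hi).length := by
  induction i, n, acc, hi using pvFactorsGo.induct with
  | case1 i n acc hi hle hne ih =>
      rw [pvFactorsGo, dif_pos hle, if_pos hne]
      exact ih hn
  | case2 i n acc hi hle hne ih =>
      rw [pvFactorsGo, dif_pos hle, if_neg hne]
      have hfd : PySem.Int.floordiv n i = n / i := PySem.Int.floordiv_eq_ediv_of_pos (by omega)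
      have hge := (pvEdivFacts n i hi hle).1
      have := ih (by rw [hfd]; omega)
      simp only [List.length_append, List.length_cons, List.length_nil] at this
      omega
  | case3 i n acc hi hle hgt =>
      rw [pvFactorsGo, dif_neg hle, if_pos hgt]
      simp
  | case4 i n acc hi hle hgt =>
      omega
-- the factor loop produces exactly one factor iff trial division finds no divisor
theorem pvFactorsGo_len_one_iff (i n : Int) (acc : List Int) (hi : 2 ≤ i) (hn : 2 ≤ n) :
    ((pvFactorsGo i n acc hi).length = acc.length + 1 ↔ pvTrial n i = true) := by
  induction i, n, acc, hi using pvFactorsGo.induct with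
  | case1 i n acc hi hle hne ih =>
      rw [pvFactorsGo, dif_pos hle, if_pos hne, pvTrial.eq_def, dif_pos hle,
        if_neg (by simpa using hne)]
      exact ih hn
  | case2 i n acc hi hle hne ih =>
      rw [pvFactorsGo, dif_pos hle, if_neg hne, pvTrial.eq_def, dif_pos hle,
        if_pos (by simpa using hne)]
      have hfd : PySem.Int.floordiv n i = n / i := PySem.Int.floordiv_eq_ediv_of_pos (by omega)
      have hge := (pvEdivFacts n i hi hle).1
      have hlen := pvFactorsGo_len_ge i (PySem.Int.floordiv n i) (acc ++ [i]) hi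
        (by rw [hfd]; omega)
      simp only [List.length_append, List.length_cons, List.length_nil] at hlen
      constructor
      · intro h; omega
      · intro h; cases h
  | case3 i n acc hi hle hgt =>
      rw [pvFactorsGo, dif_neg hle, if_pos hgt, pvTrial.eq_def, dif_neg hle]
      simp
  | case4 i n acc hi hle hgt =>
      omega

theorem pvIsPrime_iff (n : Int) : pvIsPrime n = true ↔ (2 ≤ n ∧ pvTrial n 2 = true) := by
  unfold pvIsPrime pvGetPrimeFactors
  by_cases hn : 2 ≤ n
  · have := pvFactorsGo_len_one_iff 2 n [] (by omega) hn
    simp only [List.length_nil] at this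
    simp [this, hn]
  · rw [pvFactorsGo, dif_neg (by nlinarith), if_neg (by omega)]
    simp
    omega

-- a prime other than 2 is odd
theorem pvTrial_odd (q : Int) (h2 : 2 ≤ q) (hne : q ≠ 2) (ht : pvTrial q 2 = true) :
    q % 2 = 1 := by
  by_cases h4 : 4 ≤ q
  · rw [pvTrial.eq_def, dif_pos (by omega)] at ht
    by_cases hm : PySem.Int.mod q 2 == 0
    · rw [if_pos hm] at ht; cases ht
    · have : PySem.Int.mod q 2 = q % 2 := PySem.Int.mod_eq_emod_of_pos (by omega)
      rw [this] at hm
      simp at hm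
      omega
  · omega

-- orient `decide (a = m)` as the Bool `m == a`
theorem pvFlip (m a : Int) : decide (a = m) = (m == a) := by
  by_cases h : a = m
  · subst h; simp
  · simp [h, show ¬ m = a from fun hh => h hh.symm]

theorem pyRange_1_11 : PySem.List.pyRange 1 11 1 = [1, 2, 3, 4, 5, 6, 7, 8, 9, 10] := by decide

theorem paleyLoop_two (m : Int) :
    pvPaleyLoop 2 m (PySem.List.pyRange 1 11 1) = (m == 2 || m == 0) := by
  rw [pyRange_1_11]
  have hm : ∀ a : Int, PySem.Int.mod a 4 = a % 4 :=
    fun a => PySem.Int.mod_eq_emod_of_pos (by omega)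
  simp only [pvPaleyLoop, hm]
  norm_num
  simp only [pvFlip]
  by_cases h2 : m = 2 <;> by_cases h0 : m = 0 <;> simp [h2, h0]

theorem paleyLoop_one (q m : Int) (hq : q % 4 = 1) :
    pvPaleyLoop q m (PySem.List.pyRange 1 11 1) = (m == 1) := by
  rw [pyRange_1_11]
  have hm : ∀ a : Int, PySem.Int.mod a 4 = a % 4 :=
    fun a => PySem.Int.mod_eq_emod_of_pos (by omega)
  have hz : ∀ z : Nat, q ^ z % 4 = 1 % 4 := by
    intro z
    have := Int.ModEq.pow z (show Int.ModEq 4 q 1 by unfold Int.ModEq; omega)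
    simpa using this
  simp only [pvPaleyLoop, hm, hz]
  norm_num
  simp only [pvFlip]

theorem paleyLoop_three (q m : Int) (hq : q % 4 = 3) :
    pvPaleyLoop q m (PySem.List.pyRange 1 11 1) = (m == 3 || m == 1) := by
  rw [pyRange_1_11]
  have hm : ∀ a : Int, PySem.Int.mod a 4 = a % 4 :=
    fun a => PySem.Int.mod_eq_emod_of_pos (by omega)
  have hz : ∀ z : Nat, q ^ z % 4 = (3:Int) ^ z % 4 := by
    intro z
    exact Int.ModEq.pow z (show Int.ModEq 4 q 3 by unfold Int.ModEq; omega)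
  simp only [pvPaleyLoop, hm, hz]
  norm_num
  simp only [pvFlip]
  cases hb3 : (m == 3) <;> cases hb1 : (m == 1) <;> simp [hb3, hb1]

-- ===== VERDICT (by name: the statement is the Claim_ definition above) =====
theorem is_paley_construction_py_spec : Claim_equal_is_paley_construction_py := by
  intro q m _
  unfold Spec_is_paley_construction_py is_paley_construction_py is_paley_construction_py_alt
  by_cases hp : pvIsPrime q = true
  · obtain ⟨h2, ht⟩ := (pvIsPrime_iff q).mp hp
    rw [if_pos hp, if_neg (by omega), if_neg (by simp [ht])]
    by_cases hq2 : q = 2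
    · subst hq2
      rw [if_pos rfl]
      exact paleyLoop_two m
    · rw [if_neg hq2]
      have hodd := pvTrial_odd q h2 hq2 ht
      have hm4 : PySem.Int.mod q 4 = q % 4 := PySem.Int.mod_eq_emod_of_pos (by omega)
      have hcase : q % 4 = 1 ∨ q % 4 = 3 := by omega
      rcases hcase with h | h
      · rw [if_pos (by simp [hm4, h])]
        exact paleyLoop_one q m h
      · rw [if_neg (by simp [hm4, h])]
        exact paleyLoop_three q m h
  · rw [if_neg hp]
    have hnot := (not_iff_not.mpr (pvIsPrime_iff q)).mp hp
    push_neg at hnot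
    by_cases h2 : 2 ≤ q
    · have hf : pvTrial q 2 = false := by
        rcases Bool.eq_false_or_eq_true (pvTrial q 2) with h | h
        · exact absurd h (hnot h2)
        · exact h
      rw [if_neg (by omega), if_pos hf]
    · rw [if_pos (by omega)]
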